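-- pv_equiv track=rewrite | github.com/madeba/MTD_transmission | Python_Tomo/CorrectionAberration.py | SizePoly2D
-- ===== SOURCE A (Python) =====
-- def SizePoly2D(deg):
--     """
--     Estimation of the size of the computed polynom. Further used in estimation of the column number in PolynomToFit function
--
--     Parameters
--     ----------
--     deg : int
--         Degree of the polynom to be fitted.
--
--     Returns
--     -------
--     size : int
--         Size of the polynom (equivalent to the number of columns in PolynomToFit function).
--
--     """
--     j = size = 0
--     for i in range(0,deg-1):
--         while i+j <=deg:
--             size += 1
--             j += 1
--         j = 0
--     return size
-- ===== SOURCE B (Python) =====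
-- def SizePoly2D(deg):
--     # Closed form: A's loops count sum_{i=0}^{deg-2} (deg+1-i), an arithmetic
--     # series equal to (deg+1)(deg+2)//2 - 3 for deg >= 2, and 0 otherwise.
--     if deg < 2:
--         return 0
--     return (deg + 1) * (deg + 2) // 2 - 3
-- ===== Notes on version B (the rewrite author's own statement) =====
-- stated objective: faster
-- what changed: Replaced the nested for/while counting loops with the closed-form arithmetic-series value (deg+1)(deg+2)/2 - 3 (0 for deg < 2).
import Mathlib
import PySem

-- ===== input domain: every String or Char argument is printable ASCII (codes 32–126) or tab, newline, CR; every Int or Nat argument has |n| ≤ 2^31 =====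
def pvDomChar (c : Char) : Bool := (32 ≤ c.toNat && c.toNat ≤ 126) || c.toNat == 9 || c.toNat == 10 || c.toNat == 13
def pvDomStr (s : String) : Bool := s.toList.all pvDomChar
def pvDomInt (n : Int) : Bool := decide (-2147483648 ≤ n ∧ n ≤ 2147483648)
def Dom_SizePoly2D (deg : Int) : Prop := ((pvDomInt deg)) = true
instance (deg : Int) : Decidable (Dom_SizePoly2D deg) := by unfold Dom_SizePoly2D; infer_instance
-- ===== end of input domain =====

-- B replaces A's nested counting loops by the closed-form arithmetic-series value (O(1) instead of O(deg^2)).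


-- ===== PORT A =====
-- inner 'while i+j <= deg: size += 1; j += 1' loop; returns (j, size)
def SizePoly2D_while (deg i j size : Int) : Int × Int :=
  if _h : i + j ≤ deg then SizePoly2D_while deg i (j + 1) (size + 1) else (j, size)
termination_by (deg + 1 - (i + j)).toNat
decreasing_by omega

def SizePoly2D (deg : Int) : Int :=
  -- j = size = 0; for i in range(0, deg-1): while …; j = 0
  ((PySem.List.pyRange 0 (deg - 1) 1).foldl
    (fun (st : Int × Int) i =>
      let size' := (SizePoly2D_while deg i st.1 st.2).2
      (0, size'))
    (0, 0)).2

-- ===== PORT B =====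
def SizePoly2D_alt (deg : Int) : Int :=
  if deg < 2 then 0
  else PySem.Int.floordiv ((deg + 1) * (deg + 2)) 2 - 3

-- ===== PRECONDITION & SPEC =====
def Spec_SizePoly2D (deg : Int) (out : Int) : Prop := out = SizePoly2D_alt deg
instance (deg : Int) (out : Int) : Decidable (Spec_SizePoly2D deg out) := by unfold Spec_SizePoly2D; infer_instance

-- ===== CLAIM (what is proved, stated in full; the proofs are below) =====
def Claim_equal_SizePoly2D : Prop := ∀ (deg : Int), Dom_SizePoly2D deg → Spec_SizePoly2D deg (SizePoly2D deg)

-- ===== LEMMAS AND PROOFS =====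

-- the while loop adds max(deg+1-i-j, 0) to size
theorem SizePoly2D_while_eq (deg i : Int) : ∀ (j size : Int),
    (SizePoly2D_while deg i j size).2 = size + max (deg + 1 - i - j) 0 := by
  intro j size
  induction j, size using SizePoly2D_while.induct deg i with
  | case1 j size h ih =>
      rw [SizePoly2D_while, dif_pos h, ih]; omega
  | case2 j size h =>
      rw [SizePoly2D_while, dif_neg h]; omega

-- the foldl sums deg+1-i over the range, starting from j = 0 with accumulator s
theorem SizePoly2D_foldl_eq (deg : Int) : ∀ (l : List Int) (s : Int),
    (∀ i ∈ l, i ≤ deg) →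
    (l.foldl (fun (st : Int × Int) i =>
        let size' := (SizePoly2D_while deg i st.1 st.2).2
        (0, size')) (0, s)).2
      = s + (l.map (fun i => deg + 1 - i)).sum := by
  intro l
  induction l with
  | nil => intro s _; simp
  | cons a t ih =>
      intro s h
      simp only [List.foldl_cons, List.map_cons, List.sum_cons]
      rw [ih _ (fun i hi => h i (List.mem_cons_of_mem a hi))]
      rw [SizePoly2D_while_eq]
      have := h a (List.mem_cons_self)
      omega

theorem sum_range_lin (c : Int) : ∀ (n : Nat),
    2 * ((List.range n).map (fun k : Nat => c - (k : Int))).sum = n * (2 * c) - n * (n - 1) := by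
  intro n
  induction n with
  | zero => simp
  | succ m ih =>
      rw [List.range_succ]
      simp only [List.map_append, List.sum_append, List.map_cons, List.map_nil,
        List.sum_cons, List.sum_nil]
      push_cast
      push_cast at ih
      linear_combination ih

-- ===== VERDICT (by name: the statement is the Claim_ definition above) =====
theorem SizePoly2D_spec : Claim_equal_SizePoly2D := by
  intro deg _
  unfold Spec_SizePoly2D SizePoly2D SizePoly2D_alt
  rw [SizePoly2D_foldl_eq deg _ 0
    (by intro i hi; rw [PySem.List.mem_pyRange_one] at hi; omega)]
  rw [PySem.List.pyRange_one]
  simp only [zero_add, List.map_map]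
  have hmap : (List.range (deg - 1 - 0).toNat).map
      ((fun i => deg + 1 - i) ∘ (fun k : Nat => (k : Int)))
      = (List.range (deg - 1).toNat).map (fun k : Nat => (deg + 1) - (k : Int)) := by
    rw [show (deg - 1 - 0).toNat = (deg - 1).toNat by omega]
    rfl
  rw [hmap]
  by_cases hd : deg < 2
  · have h01 : (deg - 1).toNat = 0 ∨ (deg - 1).toNat = 1 := by omega
    rw [if_pos hd]
    rcases h01 with h0 | h1
    · rw [h0]; simp
    · rw [h1]
      simp only [List.range_one, List.map_cons, List.map_nil, List.sum_cons, List.sum_nil]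
      omega
  · rw [if_neg hd]
    have hn : ((deg - 1).toNat : Int) = deg - 1 := by omega
    have h := sum_range_lin (deg + 1) (deg - 1).toNat
    rw [hn] at h
    have key : 2 * ((List.range (deg - 1).toNat).map
        (fun k : Nat => (deg + 1) - (k : Int))).sum = (deg + 1) * (deg + 2) - 6 := by
      linear_combination h
    rw [PySem.Int.floordiv_eq_ediv_of_pos (by omega)]
    omega
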